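-- pv_equiv track=rewrite | github.com/kdoda/MachineLearning | 05 Decision Trees/05prove.py | __max_repeated
-- ===== SOURCE A (Python) =====
-- def __max_repeated(classes):
--     assert len(classes) != 0
--
--     seen = set()
--     dups = set()
--     for x in classes:
--         if x in seen:
--             dups.add(x)
--         seen.add(x)
--     return max(dups) if len(dups) != 0 else classes[0]
-- ===== SOURCE B (Python) =====
-- def __max_repeated(classes):
--     assert len(classes) != 0
--     s = sorted(classes)
--     best = None
--     for a, b in zip(s, s[1:]):
--         if a == b:
--             best = b
--     return best if best is not None else classes[0]
-- ===== Notes on version B (the rewrite author's own statement) =====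
-- stated objective: alternative
-- what changed: Replaces the two-hash-set single pass plus max(dups) with sorted(classes) followed by an adjacent-equal scan that keeps the last (largest) duplicated value.
import Mathlib
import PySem

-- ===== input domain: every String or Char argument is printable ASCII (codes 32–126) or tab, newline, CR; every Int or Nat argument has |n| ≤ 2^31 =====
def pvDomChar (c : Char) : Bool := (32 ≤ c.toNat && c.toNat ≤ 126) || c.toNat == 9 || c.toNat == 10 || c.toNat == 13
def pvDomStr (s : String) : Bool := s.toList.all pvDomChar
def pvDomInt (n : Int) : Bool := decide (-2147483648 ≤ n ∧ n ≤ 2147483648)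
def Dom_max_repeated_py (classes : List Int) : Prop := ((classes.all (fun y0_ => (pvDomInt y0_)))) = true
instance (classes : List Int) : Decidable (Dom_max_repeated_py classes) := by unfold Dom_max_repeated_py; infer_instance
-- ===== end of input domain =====

-- B replaces A's two-hash-set pass + max(dups) by sorted(classes) and an adjacent-equal scan (alternative algorithm).
-- ===== PORT A =====
-- the loop: seen/dups are Python sets; dups.add(x) happens when x was already in seen
def max_repeated_py (classes : List Int) : Int :=
  let st := classes.foldl
    (fun (p : PySem.Set Int × PySem.Set Int) x =>
      (PySem.Set.add p.1 x, if PySem.Set.contains p.1 x then PySem.Set.add p.2 x else p.2))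
    (PySem.Set.empty, PySem.Set.empty)
  -- max(dups) if len(dups) != 0 else classes[0]; getD-defaults are unreachable under Pre_
  if PySem.Set.len st.2 ≠ 0 then (PySem.List.max? st.2 (fun y => y)).getD 0
  else (PySem.List.pyGet? classes 0).getD 0

-- ===== PORT B =====
def max_repeated_py_alt (classes : List Int) : Int :=
  let s := PySem.List.sorted classes (fun y => y) false
  -- for a, b in zip(s, s[1:]): if a == b: best = b
  let best := (s.zip s.tail).foldl
    (fun (acc : Option Int) p => if p.1 = p.2 then some p.2 else acc) none
  match best with
  | some m => m
  | none => (PySem.List.pyGet? classes 0).getD 0   -- classes[0]; unreachable default under Pre_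

-- ===== PRECONDITION & SPEC =====
-- A asserts len(classes) != 0 (AssertionError on []); the empty list is excluded.
def Pre_max_repeated_py (classes : List Int) : Prop := classes ≠ []
instance (classes : List Int) : Decidable (Pre_max_repeated_py classes) := by
  unfold Pre_max_repeated_py; infer_instance
def pvWitness_max_repeated_py : List Int := [2, 1, 2, 3]
def Spec_max_repeated_py (classes : List Int) (out : Int) : Prop := out = max_repeated_py_alt classes
instance (classes : List Int) (out : Int) : Decidable (Spec_max_repeated_py classes out) := by
  unfold Spec_max_repeated_py; infer_instance

-- ===== CLAIM (what is proved, stated in full; the proofs are below) =====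
def Claim_equal_max_repeated_py : Prop := ∀ (classes : List Int), Dom_max_repeated_py classes → Pre_max_repeated_py classes → Spec_max_repeated_py classes (max_repeated_py classes)

-- ===== LEMMAS AND PROOFS =====

-- count over cons, in if-form
theorem cnt_cons (y x : Int) (t : List Int) :
    (x :: t).count y = t.count y + (if x = y then 1 else 0) := by
  simp [List.count_cons]

-- A's loop: membership in the dups component = "duplicated so far"
theorem loopA_mem (l : List Int) (seen dups : PySem.Set Int) (y : Int) :
    y ∈ (l.foldl
      (fun (p : PySem.Set Int × PySem.Set Int) x =>
        (PySem.Set.add p.1 x, if PySem.Set.contains p.1 x then PySem.Set.add p.2 x else p.2))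
      (seen, dups)).2
    ↔ y ∈ dups ∨ (y ∈ seen ∧ y ∈ l) ∨ 2 ≤ l.count y := by
  induction l generalizing seen dups with
  | nil => simp
  | cons x t ih =>
    simp only [List.foldl_cons]
    by_cases hxs : x ∈ seen
    · have hcx : PySem.Set.contains seen x = true := (PySem.Set.contains_iff _ _).mpr hxs
      simp only [hcx, if_pos]
      rw [ih]
      by_cases hyx : y = x
      · subst hyx
        simp [PySem.Set.mem_add, hxs]
      · have hc := cnt_cons y x t
        rw [if_neg (fun h => hyx h.symm)] at hc
        simp [PySem.Set.mem_add, hyx, List.mem_cons, hc]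
    · have hcx : PySem.Set.contains seen x = false := by
        rcases h : PySem.Set.contains seen x with _ | _
        · rfl
        · exact absurd ((PySem.Set.contains_iff _ _).mp h) hxs
      simp only [hcx, Bool.false_eq_true, if_neg, not_false_eq_true]
      rw [ih]
      by_cases hyx : y = x
      · subst hyx
        have hc := cnt_cons y y t
        rw [if_pos rfl] at hc
        constructor
        · rintro (h | ⟨-, ht⟩ | h2)
          · exact Or.inl h
          · have := List.count_pos_iff.mpr ht
            right; right; omega
          · right; right; omega
        · rintro (h | ⟨hse, -⟩ | h2)
          · exact Or.inl h
          · exact absurd hse hxs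
          · rw [hc] at h2
            exact Or.inr (Or.inl ⟨(PySem.Set.mem_add _ _ _).mpr (Or.inr rfl),
              List.count_pos_iff.mp (by omega)⟩)
      · have hc := cnt_cons y x t
        rw [if_neg (fun h => hyx h.symm)] at hc
        simp [PySem.Set.mem_add, hyx, List.mem_cons, hc]

-- membership in A's dups set ↔ the value occurs at least twice in classes
theorem dupsA_mem (classes : List Int) (y : Int) :
    y ∈ (classes.foldl
      (fun (p : PySem.Set Int × PySem.Set Int) x =>
        (PySem.Set.add p.1 x, if PySem.Set.contains p.1 x then PySem.Set.add p.2 x else p.2))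
      (PySem.Set.empty, PySem.Set.empty)).2
    ↔ 2 ≤ classes.count y := by
  rw [loopA_mem]
  simp [PySem.Set.empty]

-- what B's adjacent scan over a ≤-sorted list returns
def BScanSpec (t : List Int) (acc r : Option Int) : Prop :=
  (r = acc ∧ ∀ y, t.count y ≤ 1) ∨
  (∃ m, r = some m ∧ 2 ≤ t.count m ∧ ∀ y, 2 ≤ t.count y → y ≤ m)

theorem loopB_spec (t : List Int) (acc : Option Int)
    (hs : t.Pairwise (fun a b => a ≤ b)) :
    BScanSpec t acc ((t.zip t.tail).foldl
      (fun (a : Option Int) p => if p.1 = p.2 then some p.2 else a) acc) := by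
  induction t generalizing acc with
  | nil => exact Or.inl ⟨rfl, by simp⟩
  | cons x t ih =>
    cases t with
    | nil =>
      refine Or.inl ⟨rfl, fun y => ?_⟩
      rw [show ([x] : List Int) = x :: [] from rfl, cnt_cons y x []]
      by_cases h : x = y <;> simp [h]
    | cons z r =>
      have hxall : ∀ w ∈ z :: r, x ≤ w := (List.pairwise_cons.mp hs).1
      have hxz : x ≤ z := hxall z List.mem_cons_self
      have hs' : (z :: r).Pairwise (fun a b => a ≤ b) := (List.pairwise_cons.mp hs).2
      have step : ((x :: z :: r).zip (x :: z :: r).tail).foldl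
          (fun (a : Option Int) p => if p.1 = p.2 then some p.2 else a) acc
        = ((z :: r).zip (z :: r).tail).foldl
          (fun (a : Option Int) p => if p.1 = p.2 then some p.2 else a)
          (if x = z then some z else acc) := by
        simp [List.zip]
      rw [step]
      rcases ih (if x = z then some z else acc) hs' with ⟨hr, hcnt⟩ | ⟨m, hr, hm2, hmax⟩
      · by_cases hxeq : x = z
        · -- the new adjacent pair matches: result is some z, the (unique) duplicate
          refine Or.inr ⟨z, by simpa [hxeq] using hr, ?_, ?_⟩
          · have h1 : 0 < (z :: r).count z := List.count_pos_iff.mpr List.mem_cons_self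
            have hc := cnt_cons z x (z :: r)
            rw [hc, if_pos hxeq]
            omega
          · intro y hy
            by_cases hyx : y = x
            · exact hyx.le.trans hxeq.le
            · exfalso
              have hc := cnt_cons y x (z :: r)
              rw [if_neg (fun h => hyx h.symm)] at hc
              have h1 := hcnt y
              omega
        · refine Or.inl ⟨by simpa [hxeq] using hr, ?_⟩
          intro y
          by_cases hyx : y = x
          · -- y = x occurs exactly once: x ∉ z :: r since x ≤ z ≤ all and x ≠ z
            have hnin : x ∉ z :: r := by
              intro hmem
              rcases List.mem_cons.mp hmem with h | hmr
              · exact hxeq h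
              · exact hxeq (le_antisymm hxz ((List.pairwise_cons.mp hs').1 x hmr))
            have h0 : (z :: r).count y = 0 :=
              List.count_eq_zero.mpr (by rw [hyx]; exact hnin)
            have hc := cnt_cons y x (z :: r)
            rw [hc, h0, if_pos hyx.symm]
          · have hc := cnt_cons y x (z :: r)
            rw [if_neg (fun h => hyx h.symm)] at hc
            have h1 := hcnt y
            omega
      · refine Or.inr ⟨m, hr, ?_, ?_⟩
        · have hc := cnt_cons m x (z :: r)
          by_cases h : x = m
          · rw [if_pos h] at hc; omega
          · rw [if_neg h] at hc; omega
        · intro y hy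
          by_cases hyx : y = x
          · have hmmem : m ∈ z :: r := List.count_pos_iff.mp (by omega)
            exact hyx ▸ hxall m hmmem
          · have hc := cnt_cons y x (z :: r)
            rw [if_neg (fun h => hyx h.symm)] at hc
            exact hmax y (by omega)

-- sorted preserves counts
theorem count_sorted (classes : List Int) (y : Int) :
    (PySem.List.sorted classes (fun v => v) false).count y = classes.count y :=
  (PySem.List.sorted_perm classes (fun v => v) false).count_eq y

-- ===== VERDICT (by name: the statement is the Claim_ definition above) =====
theorem max_repeated_py_spec : Claim_equal_max_repeated_py := by
  intro classes _ hpre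
  unfold Spec_max_repeated_py max_repeated_py max_repeated_py_alt
  simp only []
  set D := (classes.foldl
      (fun (p : PySem.Set Int × PySem.Set Int) x =>
        (PySem.Set.add p.1 x, if PySem.Set.contains p.1 x then PySem.Set.add p.2 x else p.2))
      (PySem.Set.empty, PySem.Set.empty)).2 with hD
  have hDmem : ∀ y, y ∈ D ↔ 2 ≤ classes.count y := fun y => dupsA_mem classes y
  set s := PySem.List.sorted classes (fun v => v) false with hsdef
  have hsp : s.Pairwise (fun a b => a ≤ b) := by
    simpa using PySem.List.sorted_pairwise classes (fun v => v)
  have hscan := loopB_spec s none hsp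
  set best := ((s.zip s.tail).foldl
      (fun (a : Option Int) p => if p.1 = p.2 then some p.2 else a) none) with hbest
  have hcnt : ∀ y, s.count y = classes.count y := count_sorted classes
  by_cases hDnil : D = []
  · -- no duplicates: both return classes[0]
    have hnone : best = none := by
      rcases hscan with ⟨hr, _⟩ | ⟨m, _, hm2, _⟩
      · exact hr
      · exfalso
        have : m ∈ D := (hDmem m).mpr (by rw [← hcnt]; exact hm2)
        simp [hDnil] at this
    rw [show PySem.Set.len D = 0 by simp [hDnil, PySem.Set.len]]
    simp [hnone]
  · -- duplicates exist: A returns max(D), B's scan returns the same value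
    obtain ⟨m, hmax⟩ : ∃ m, PySem.List.max? D (fun y => y) = some m := by
      rcases h : PySem.List.max? D (fun y => y) with _ | m
      · exact absurd ((PySem.List.max?_eq_none_iff _ _).mp h) hDnil
      · exact ⟨m, rfl⟩
    have hmD : m ∈ D := PySem.List.max?_mem hmax
    have hmub : ∀ y ∈ D, y ≤ m := PySem.List.max?_isMax hmax
    have hm2 : 2 ≤ classes.count m := (hDmem m).mp hmD
    have hlen : PySem.Set.len D ≠ 0 := by
      simp [PySem.Set.len, List.length_eq_zero_iff, hDnil]
    rcases hscan with ⟨_, hcnt1⟩ | ⟨m', hr, hm'2, hmax'⟩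
    · exfalso
      have := hcnt1 m
      rw [hcnt m] at this
      omega
    · have h1 : m ≤ m' := hmax' m (by rw [hcnt]; exact hm2)
      have h2 : m' ≤ m := hmub m' ((hDmem m').mpr (by rw [← hcnt]; exact hm'2))
      have : m' = m := le_antisymm h2 h1
      rw [hr, this, if_pos hlen, hmax]
      rfl
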